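-- pv_equiv track=rewrite | github.com/PeterOlaleru/function-prediction | scripts/tmp_patch_05_no_repo_cafa6_data.py | _compact_code_cell_source
-- ===== SOURCE A (Python) =====
-- def _is_blank_line(s: str) -> bool:
--     return s.strip() == ""
--
-- def _indent_level(s: str) -> int:
--     expanded = s.replace("\t", "    ")
--     return len(expanded) - len(expanded.lstrip(" "))
--
-- def _is_import(s: str) -> bool:
--     st = s.lstrip()
--     return st.startswith("import ") or st.startswith("from ")
--
-- def _is_def_like(s: str) -> bool:
--     st = s.lstrip()
--     return st.startswith("def ") or st.startswith("class ") or st.startswith("@")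
--
-- def _compact_code_cell_source(source: list[str]) -> list[str]:
--     # Matches scripts/compact_notebook_sources.py behaviour.
--     lines = [str(x).replace("\r\n", "\n").replace("\r", "\n").rstrip(" \t\n") for x in source]
--
--     while lines and _is_blank_line(lines[0]):
--         lines.pop(0)
--     while lines and _is_blank_line(lines[-1]):
--         lines.pop()
--     if not lines:
--         return []
--
--     out: list[str] = []
--     n = len(lines)
--     for i, cur in enumerate(lines):
--         if not _is_blank_line(cur):
--             out.append(cur)
--             continue
--
--         j = i - 1
--         while j >= 0 and _is_blank_line(lines[j]):
--             j -= 1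
--         k = i + 1
--         while k < n and _is_blank_line(lines[k]):
--             k += 1
--         if j < 0 or k >= n:
--             continue
--
--         prev = lines[j]
--         nxt = lines[k]
--         prev_indent = _indent_level(prev)
--         next_indent = _indent_level(nxt)
--
--         if next_indent == 0 and _is_def_like(nxt) and prev_indent > 0:
--             if out and out[-1] != "":
--                 out.append("")
--             continue
--
--         if prev_indent > 0 or next_indent > 0:
--             continue
--
--         if _is_import(prev) and not _is_import(nxt):
--             if out and out[-1] != "":
--                 out.append("")
--             continue
--
--         if _is_def_like(nxt) or _is_def_like(prev):
--             if out and out[-1] != "":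
--                 out.append("")
--             continue
--
--         continue
--
--     final: list[str] = []
--     prev_blank = False
--     for ln in out:
--         is_blank = _is_blank_line(ln)
--         if is_blank and prev_blank:
--             continue
--         final.append("") if is_blank else final.append(ln)
--         prev_blank = is_blank
--
--     while final and _is_blank_line(final[0]):
--         final.pop(0)
--     while final and _is_blank_line(final[-1]):
--         final.pop()
--
--     return final
-- ===== SOURCE B (Python) =====
-- # Single forward pass over blank-separated runs: instead of rescanning backward/forward
-- # around every blank line and post-deduplicating, track the previous non-blank line and a
-- # pending-blank flag, and emit at most one "" per blank run directly.
--
-- def _is_blank_line(s: str) -> bool: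
--     return s.strip() == ""
--
-- def _indent_level(s: str) -> int:
--     expanded = s.replace("\t", "    ")
--     return len(expanded) - len(expanded.lstrip(" "))
--
-- def _is_import(s: str) -> bool:
--     st = s.lstrip()
--     return st.startswith("import ") or st.startswith("from ")
--
-- def _is_def_like(s: str) -> bool:
--     st = s.lstrip()
--     return st.startswith("def ") or st.startswith("class ") or st.startswith("@")
--
-- def _keep_blank(prev: str, nxt: str) -> bool:
--     # One blank line between non-blank `prev` and `nxt` is kept iff:
--     if _indent_level(nxt) == 0 and _is_def_like(nxt) and _indent_level(prev) > 0:
--         return True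
--     if _indent_level(prev) > 0 or _indent_level(nxt) > 0:
--         return False
--     if _is_import(prev) and not _is_import(nxt):
--         return True
--     return _is_def_like(nxt) or _is_def_like(prev)
--
-- def _compact_code_cell_source(source: list[str]) -> list[str]:
--     lines = [str(x).replace("\r\n", "\n").replace("\r", "\n").rstrip(" \t\n") for x in source]
--     while lines and _is_blank_line(lines[0]):
--         lines.pop(0)
--     while lines and _is_blank_line(lines[-1]):
--         lines.pop()
--     if not lines:
--         return []
--     out = [lines[0]]
--     prev = lines[0]
--     saw_blank = False
--     for cur in lines[1:]:
--         if _is_blank_line(cur):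
--             saw_blank = True
--             continue
--         if saw_blank and _keep_blank(prev, cur):
--             out.append("")
--         out.append(cur)
--         prev = cur
--         saw_blank = False
--     return out
-- ===== Notes on version B (the rewrite author's own statement) =====
-- stated objective: alternative
-- what changed: Replaces A's per-blank-line backward/forward rescans plus the separate dedup and re-trim passes by a single forward pass that tracks the previous non-blank line and a pending-blank flag, emitting at most one empty line per blank run.
import Mathlib
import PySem

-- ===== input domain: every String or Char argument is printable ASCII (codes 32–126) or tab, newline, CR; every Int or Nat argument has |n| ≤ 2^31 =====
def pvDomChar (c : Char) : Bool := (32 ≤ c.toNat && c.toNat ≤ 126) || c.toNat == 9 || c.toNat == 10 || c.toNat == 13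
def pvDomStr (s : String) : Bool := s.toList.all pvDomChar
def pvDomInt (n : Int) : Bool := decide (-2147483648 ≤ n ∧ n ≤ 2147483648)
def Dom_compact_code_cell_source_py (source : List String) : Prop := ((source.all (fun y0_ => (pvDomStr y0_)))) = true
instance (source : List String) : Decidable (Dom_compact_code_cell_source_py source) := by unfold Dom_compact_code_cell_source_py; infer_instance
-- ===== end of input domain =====

-- B replaces A's per-blank-line backward/forward rescans and the dedup/trim post-passes by one
-- forward pass over blank-separated runs (previous non-blank line + pending-blank flag).

-- ===== shared module helpers (identical code in Source A and Source B) =====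

-- s.strip() == ""
def isBlankLine (s : String) : Bool := PySem.Str.strip s == ""

-- len(expanded) - len(expanded.lstrip(" ")) with expanded = s.replace("\t", "    ")
-- (lstrip(" ") ported by hand as dropWhile (· == ' '): exact — it removes exactly leading spaces)
def indentLevel (s : String) : Nat :=
  let expanded := (PySem.Str.replace s "\t" "    ").toList
  expanded.length - (expanded.dropWhile (fun c => c == ' ')).length

def isImportLine (s : String) : Bool :=
  let st := PySem.Str.lstrip s
  PySem.Str.startswith st "import " || PySem.Str.startswith st "from "

def isDefLike (s : String) : Bool :=
  let st := PySem.Str.lstrip s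
  PySem.Str.startswith st "def " || PySem.Str.startswith st "class " || PySem.Str.startswith st "@"

-- str(x).replace("\r\n", "\n").replace("\r", "\n").rstrip(" \t\n")
-- (rstrip(" \t\n") ported by hand: drop trailing characters belonging to the set {' ', '\t', '\n'} — exact)
def normLine (s : String) : String :=
  let t := PySem.Str.replace (PySem.Str.replace s "\r\n" "\n") "\r" "\n"
  String.ofList ((t.toList.reverse.dropWhile (fun c => c == ' ' || c == '\t' || c == '\n')).reverse)

-- while lines and _is_blank_line(lines[0]): lines.pop(0)
def popLeading : List String → List String
  | [] => []
  | x :: xs => if isBlankLine x then popLeading xs else x :: xs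

-- while lines and _is_blank_line(lines[-1]): lines.pop()
def popTrailing : List String → List String
  | [] => []
  | x :: xs =>
    match popTrailing xs with
    | [] => if isBlankLine x then [] else [x]
    | ys => x :: ys

-- ===== PORT A =====

-- j = i - 1; while j >= 0 and _is_blank_line(lines[j]): j -= 1  — scanned over the reversed
-- prefix of processed lines; returns lines[j] (none = j < 0, i.e. no non-blank line before i)
def jscanA : List String → Option String
  | [] => none
  | x :: xs => if isBlankLine x then jscanA xs else some x

-- k = i + 1; while k < n and _is_blank_line(lines[k]): k += 1 — scanned over the remaining
-- suffix; returns lines[k] (none = k >= n)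
def kscanA : List String → Option String
  | [] => none
  | x :: xs => if isBlankLine x then kscanA xs else some x

-- if out and out[-1] != "": out.append("")
def appendBlankIf (out : List String) : List String :=
  if out.isEmpty = false ∧ PySem.List.pyGet? out (-1) ≠ some "" then out ++ [""] else out

-- the for-loop over enumerate(lines): left = reversed processed prefix, rest = remaining suffix
def mainLoopA (left : List String) : List String → List String → List String
  | [], out => out
  | cur :: rest, out =>
    if isBlankLine cur = false then
      mainLoopA (cur :: left) rest (out ++ [cur])
    else
      match jscanA left, kscanA rest with
      | some prev, some nxt =>
        if indentLevel nxt = 0 ∧ isDefLike nxt = true ∧ 0 < indentLevel prev then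
          mainLoopA (cur :: left) rest (appendBlankIf out)
        else if 0 < indentLevel prev ∨ 0 < indentLevel nxt then
          mainLoopA (cur :: left) rest out
        else if isImportLine prev = true ∧ isImportLine nxt = false then
          mainLoopA (cur :: left) rest (appendBlankIf out)
        else if isDefLike nxt = true ∨ isDefLike prev = true then
          mainLoopA (cur :: left) rest (appendBlankIf out)
        else
          mainLoopA (cur :: left) rest out
      | _, _ => mainLoopA (cur :: left) rest out   -- if j < 0 or k >= n: continue

-- the final pass: skip a blank that follows a blank, re-emit blanks as ""
def dedupA : List String → Bool → List String → List String
  | [], _, final => final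
  | ln :: rest, prevBlank, final =>
    let isBlank := isBlankLine ln
    if isBlank = true ∧ prevBlank = true then dedupA rest prevBlank final
    else dedupA rest isBlank (final ++ [if isBlank then "" else ln])

def compact_code_cell_source_py (source : List String) : List String :=
  let lines := popTrailing (popLeading (source.map normLine))
  if lines.isEmpty then []
  else popTrailing (popLeading (dedupA (mainLoopA [] lines []) false []))

-- ===== PORT B =====

def keepBlank (prev nxt : String) : Bool :=
  if indentLevel nxt = 0 ∧ isDefLike nxt = true ∧ 0 < indentLevel prev then true
  else if 0 < indentLevel prev ∨ 0 < indentLevel nxt then false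
  else if isImportLine prev = true ∧ isImportLine nxt = false then true
  else decide (isDefLike nxt = true ∨ isDefLike prev = true)

-- single pass: prev = last non-blank line emitted, sawBlank = a blank run is pending
def loopB : List String → String → Bool → List String → List String
  | [], _, _, out => out
  | cur :: rest, prev, sawBlank, out =>
    if isBlankLine cur then loopB rest prev true out
    else
      let out := if sawBlank = true ∧ keepBlank prev cur = true then out ++ [""] else out
      loopB rest cur false (out ++ [cur])

def compact_code_cell_source_py_alt (source : List String) : List String :=
  let lines := popTrailing (popLeading (source.map normLine))
  match lines with
  | [] => []
  | first :: rest => loopB rest first false [first]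

-- ===== PRECONDITION & SPEC =====
def Spec_compact_code_cell_source_py (source : List String) (out : List String) : Prop := out = compact_code_cell_source_py_alt source
instance (source : List String) (out : List String) : Decidable (Spec_compact_code_cell_source_py source out) := by unfold Spec_compact_code_cell_source_py; infer_instance

-- ===== CLAIM (what is proved, stated in full; the proofs are below) =====
def Claim_equal_compact_code_cell_source_py : Prop := ∀ (source : List String), Dom_compact_code_cell_source_py source → Spec_compact_code_cell_source_py source (compact_code_cell_source_py source)

-- ===== LEMMAS AND PROOFS =====

theorem isBlankLine_empty : isBlankLine "" = true := by decide

theorem ne_empty_of_not_blank {s : String} (h : isBlankLine s = false) : s ≠ "" := by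
  intro hs; rw [hs] at h; simp [isBlankLine_empty] at h

theorem appendBlankIf_of_last_nonblank {out : List String} {z : String}
    (hlast : out.getLast? = some z) (hz : isBlankLine z = false) :
    appendBlankIf out = out ++ [""] := by
  have hne : out ≠ [] := by intro h; rw [h] at hlast; simp at hlast
  unfold appendBlankIf
  rw [PySem.List.pyGet?_neg_one, hlast]
  simp [hne, ne_empty_of_not_blank hz]

theorem appendBlankIf_of_last_blank {out : List String}
    (hlast : out.getLast? = some "") : appendBlankIf out = out := by
  unfold appendBlankIf
  rw [PySem.List.pyGet?_neg_one, hlast]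
  simp

-- the branch chain of A's blank case equals `if keepBlank prev nxt then · (appendBlankIf out) else · out`
theorem blank_chain (prev nxt : String) {α : Type} (f : List String → α) (out : List String) :
    (if indentLevel nxt = 0 ∧ isDefLike nxt = true ∧ 0 < indentLevel prev then f (appendBlankIf out)
     else if 0 < indentLevel prev ∨ 0 < indentLevel nxt then f out
     else if isImportLine prev = true ∧ isImportLine nxt = false then f (appendBlankIf out)
     else if isDefLike nxt = true ∨ isDefLike prev = true then f (appendBlankIf out)
     else f out)
    = f (if keepBlank prev nxt then appendBlankIf out else out) := by
  unfold keepBlank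
  split_ifs with h1 h2 h3 h4 h5 <;> simp_all

theorem getLast?_cons_ne {α : Type} (a : α) (l : List α) (h : l ≠ []) :
    (a :: l).getLast? = l.getLast? := by
  cases l with
  | nil => exact absurd rfl h
  | cons b m => simp [List.getLast?_cons_cons]

theorem jscanA_cons_blank {c : String} (l : List String) (hc : isBlankLine c = true) :
    jscanA (c :: l) = jscanA l := by simp [jscanA, hc]

theorem jscanA_cons_nonblank {c : String} (l : List String) (hc : isBlankLine c = false) :
    jscanA (c :: l) = some c := by simp [jscanA, hc]

theorem kscanA_some {l : List String}
    (hlast : ∀ w ∈ l.getLast?, isBlankLine w = false) (hne : l ≠ []) :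
    ∃ nxt, kscanA l = some nxt ∧ isBlankLine nxt = false := by
  induction l with
  | nil => exact absurd rfl hne
  | cons c rest ih =>
    by_cases hc : isBlankLine c = true
    · have hrne : rest ≠ [] := by
        intro h; subst h
        have := hlast c (by simp)
        rw [hc] at this; cases this
      have hlast' : ∀ w ∈ rest.getLast?, isBlankLine w = false := by
        intro w hw; exact hlast w (by rw [getLast?_cons_ne _ _ hrne]; exact hw)
      obtain ⟨nxt, h1, h2⟩ := ih hlast' hrne
      exact ⟨nxt, by simp [kscanA, hc, h1], h2⟩
    · exact ⟨c, by simp [kscanA, eq_false_of_ne_true hc], eq_false_of_ne_true hc⟩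

-- the core: A's loop (zippered) against B's single pass, in both saw-blank states.
-- When sawBlank = true, A has already appended the run's "" (iff keepBlank prev nxt for nxt the
-- run's following non-blank line); B appends it only when the run ends.
theorem main_loop_eq (rest : List String) :
    ∀ (left : List String) (prev : String) (b : Bool) (out : List String),
      isBlankLine prev = false →
      jscanA left = some prev →
      out.getLast? = some prev →
      (∀ w ∈ rest.getLast?, isBlankLine w = false) →
      (b = true → rest ≠ []) →
      mainLoopA left rest
        (if b then (match kscanA rest with
                    | some nxt => if keepBlank prev nxt then out ++ [""] else out
                    | none => out)
         else out)
      = loopB rest prev b out := by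
  induction rest with
  | nil =>
    intro left prev b out hprev hj hout hlast hb
    cases b with
    | false => simp [mainLoopA, loopB]
    | true => exact absurd rfl (hb rfl)
  | cons cur rest ih =>
    intro left prev b out hprev hj hout hlast hb
    by_cases hcur : isBlankLine cur = true
    · -- cur is blank: A takes the blank branch, B sets sawBlank
      have hrne : rest ≠ [] := by
        intro h; subst h
        have := hlast cur (by simp)
        rw [hcur] at this; cases this
      have hlast' : ∀ w ∈ rest.getLast?, isBlankLine w = false := by
        intro w hw; exact hlast w (by rw [getLast?_cons_ne _ _ hrne]; exact hw)
      obtain ⟨nxt, hk, hnxt⟩ := kscanA_some hlast' hrne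
      have hkcons : kscanA (cur :: rest) = some nxt := by simp [kscanA, hcur, hk]
      -- the A-side accumulator entering this step
      have step : mainLoopA left (cur :: rest)
            (if b then (match kscanA (cur :: rest) with
                        | some nxt => if keepBlank prev nxt then out ++ [""] else out
                        | none => out)
             else out)
          = mainLoopA (cur :: left) rest
            (match kscanA rest with
             | some nxt => if keepBlank prev nxt then out ++ [""] else out
             | none => out) := by
        rw [hkcons, hk]
        show mainLoopA left (cur :: rest) _ = _
        rw [mainLoopA]
        simp only [hcur, Bool.true_eq_false, if_false, hj, hk]
        rw [blank_chain prev nxt (mainLoopA (cur :: left) rest)]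
        cases hkb : keepBlank prev nxt with
        | true =>
          cases b with
          | false =>
            simp only [Bool.false_eq_true, if_true, if_false]
            rw [appendBlankIf_of_last_nonblank hout hprev]
          | true =>
            simp only [if_true]
            rw [appendBlankIf_of_last_blank (by simp)]
        | false =>
          cases b <;> simp
      rw [step]
      have := ih (cur :: left) prev true out hprev
        (by rw [jscanA_cons_blank left hcur]; exact hj) hout hlast' (fun _ => hrne)
      simp only [if_true] at this
      rw [this]
      simp [loopB, hcur]
    · -- cur is non-blank
      have hcur' : isBlankLine cur = false := eq_false_of_ne_true hcur
      have hkcons : kscanA (cur :: rest) = some cur := by simp [kscanA, hcur']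
      have houtA : (if b then (match kscanA (cur :: rest) with
                        | some nxt => if keepBlank prev nxt then out ++ [""] else out
                        | none => out)
             else out)
          = (if b = true ∧ keepBlank prev cur = true then out ++ [""] else out) := by
        rw [hkcons]
        cases b <;> cases hkb : keepBlank prev cur <;> simp [hkb]
      rw [houtA]
      set out' := if b = true ∧ keepBlank prev cur = true then out ++ [""] else out with hout'
      have stepA : mainLoopA left (cur :: rest) out' = mainLoopA (cur :: left) rest (out' ++ [cur]) := by
        rw [mainLoopA, hcur']
        simp
      rw [stepA]
      have hlast2 : ∀ w ∈ rest.getLast?, isBlankLine w = false := by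
        intro w hw
        have hrne : rest ≠ [] := by intro h; subst h; simp at hw
        exact hlast w (by rw [getLast?_cons_ne _ _ hrne]; exact hw)
      have := ih (cur :: left) cur false (out' ++ [cur]) hcur'
        (jscanA_cons_nonblank left hcur') (by simp) hlast2 (by simp)
      simp only [if_false, Bool.false_eq_true] at this
      rw [this]
      simp [loopB, hcur']
      rfl

-- no two adjacent blank lines
def noAdj (x y : String) : Prop := ¬ (isBlankLine x = true ∧ isBlankLine y = true)

-- B's pass keeps the output well-formed: head unchanged, last non-blank, no adjacent blanks,
-- and every blank element is the literal ""
theorem loopB_shape (rest : List String) :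
    ∀ (prev : String) (b : Bool) (out : List String) (z : String),
      out.getLast? = some z → isBlankLine z = false →
      List.IsChain noAdj out → (∀ s ∈ out, isBlankLine s = true → s = "") →
      (loopB rest prev b out).head? = out.head? ∧
      (∃ w, (loopB rest prev b out).getLast? = some w ∧ isBlankLine w = false) ∧
      List.IsChain noAdj (loopB rest prev b out) ∧
      (∀ s ∈ loopB rest prev b out, isBlankLine s = true → s = "") := by
  induction rest with
  | nil =>
    intro prev b out z hz hznb hch hbe
    exact ⟨rfl, ⟨z, hz, hznb⟩, hch, hbe⟩
  | cons cur rest ih =>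
    intro prev b out z hz hznb hch hbe
    have hne : out ≠ [] := by intro h; rw [h] at hz; simp at hz
    by_cases hcur : isBlankLine cur = true
    · simp only [loopB, hcur, if_true]
      exact ih prev true out z hz hznb hch hbe
    · have hcur' : isBlankLine cur = false := eq_false_of_ne_true hcur
      simp only [loopB, hcur', Bool.false_eq_true, if_false]
      set mid := if b = true ∧ keepBlank prev cur = true then out ++ [""] else out with hmid
      have hmid_head : mid.head? = out.head? := by
        rw [hmid]; split
        · rw [List.head?_append_of_ne_nil _ hne]
        · rfl
      have hmid_ch : List.IsChain noAdj mid := by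
        rw [hmid]; split
        · rw [List.isChain_append]
          refine ⟨hch, List.IsChain.singleton _, ?_⟩
          intro x hx y hy
          simp at hy; subst hy
          rw [hz] at hx; simp at hx; subst hx
          intro hcc; rw [hznb] at hcc; exact absurd hcc.1 (by simp)
        · exact hch
      have hmid_be : ∀ s ∈ mid, isBlankLine s = true → s = "" := by
        rw [hmid]; split
        · intro s hs hbs
          rcases List.mem_append.mp hs with h | h
          · exact hbe s h hbs
          · simpa using h
        · exact hbe
      have hmid_last_ne : ∀ y ∈ mid.getLast?, noAdj y cur := by
        intro y hy
        rw [hmid] at hy; intro hcc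
        rw [hcur'] at hcc; exact absurd hcc.2 (by simp)
      have hout2_last : (mid ++ [cur]).getLast? = some cur := by simp
      have hout2_ch : List.IsChain noAdj (mid ++ [cur]) := by
        rw [List.isChain_append]
        refine ⟨hmid_ch, List.IsChain.singleton _, ?_⟩
        intro x hx y hy
        simp at hy; subst hy
        exact hmid_last_ne x hx
      have hout2_be : ∀ s ∈ mid ++ [cur], isBlankLine s = true → s = "" := by
        intro s hs hbs
        rcases List.mem_append.mp hs with h | h
        · exact hmid_be s h hbs
        · simp at h; subst h; rw [hcur'] at hbs; cases hbs
      have hmidne : mid ≠ [] := by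
        rw [hmid]; split <;> simp [hne]
      obtain ⟨h1, h2, h3, h4⟩ := ih cur false (mid ++ [cur]) cur hout2_last hcur' hout2_ch hout2_be
      refine ⟨?_, h2, h3, h4⟩
      rw [h1, List.head?_append_of_ne_nil _ hmidne, hmid_head]

theorem dedupA_cons_step (x : String) (rest : List String) (pb : Bool) (acc : List String)
    (h : ¬ (isBlankLine x = true ∧ pb = true)) :
    dedupA (x :: rest) pb acc
      = dedupA rest (isBlankLine x) (acc ++ [if isBlankLine x then "" else x]) := by
  simp only [dedupA]
  rw [if_neg h]

-- the dedup pass is the identity on a chain with no adjacent blanks whose blanks are all ""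
theorem dedupA_id (xs : List String) :
    ∀ (pb : Bool) (acc : List String),
      List.IsChain noAdj xs → (∀ s ∈ xs, isBlankLine s = true → s = "") →
      (pb = true → ∀ y ∈ xs.head?, isBlankLine y = false) →
      dedupA xs pb acc = acc ++ xs := by
  induction xs with
  | nil => intro pb acc _ _ _; simp [dedupA]
  | cons x rest ih =>
    intro pb acc hch hbe hpb
    have hch' : List.IsChain noAdj rest := List.IsChain.of_cons hch
    have hbe' : ∀ s ∈ rest, isBlankLine s = true → s = "" := fun s hs => hbe s (by simp [hs])
    by_cases hx : isBlankLine x = true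
    · have hpbf : pb = false := by
        cases pb with
        | false => rfl
        | true =>
          have := hpb rfl x (by simp)
          rw [hx] at this; cases this
      subst hpbf
      have hxe : x = "" := hbe x (by simp) hx
      rw [dedupA_cons_step x rest false acc (by simp), hx]
      have hhd : ∀ y ∈ rest.head?, isBlankLine y = false := by
        intro y hy
        cases rest with
        | nil => simp at hy
        | cons r rs =>
          simp at hy; subst hy
          have := List.isChain_cons_cons.mp hch
          by_cases hr : isBlankLine r = true
          · exact absurd ⟨hx, hr⟩ this.1
          · exact eq_false_of_ne_true hr
      rw [ih true _ hch' hbe' (fun _ => hhd)]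
      simp [hxe]
    · have hx' : isBlankLine x = false := eq_false_of_ne_true hx
      rw [dedupA_cons_step x rest pb acc (by simp [hx']), hx']
      rw [ih false _ hch' hbe' (by simp)]
      simp

theorem popLeading_head_nonblank : ∀ l : List String, ∀ x ∈ (popLeading l).head?, isBlankLine x = false := by
  intro l
  induction l with
  | nil => intro x hx; simp [popLeading] at hx
  | cons a rest ih =>
    intro x hx
    by_cases ha : isBlankLine a = true
    · rw [popLeading, if_pos ha] at hx; exact ih x hx
    · rw [popLeading, if_neg ha] at hx
      simp at hx; subst hx; exact eq_false_of_ne_true ha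

theorem popTrailing_last_nonblank : ∀ l : List String, ∀ w ∈ (popTrailing l).getLast?, isBlankLine w = false := by
  intro l
  induction l with
  | nil => intro w hw; simp [popTrailing] at hw
  | cons a rest ih =>
    intro w hw
    cases hys : popTrailing rest with
    | nil =>
      by_cases ha : isBlankLine a = true
      · simp [popTrailing, hys, ha] at hw
      · simp [popTrailing, hys, ha] at hw
        subst hw; exact eq_false_of_ne_true ha
    | cons y ys =>
      simp only [popTrailing, hys] at hw
      rw [getLast?_cons_ne _ _ (by simp)] at hw
      exact ih w (by rw [hys]; exact hw)

theorem popTrailing_head : ∀ l : List String, popTrailing l ≠ [] → (popTrailing l).head? = l.head? := by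
  intro l
  induction l with
  | nil => intro h; simp [popTrailing] at h
  | cons a rest _ =>
    intro h
    cases hys : popTrailing rest with
    | nil =>
      simp only [popTrailing, hys] at h ⊢
      by_cases ha : isBlankLine a = true
      · rw [if_pos ha] at h; exact absurd rfl h
      · rw [if_neg ha]; rfl
    | cons y ys => simp only [popTrailing, hys]; rfl

theorem popTrailing_id : ∀ l : List String, (∀ w ∈ l.getLast?, isBlankLine w = false) → popTrailing l = l := by
  intro l
  induction l with
  | nil => intro _; rfl
  | cons a rest ih =>
    intro h
    cases hre : rest with
    | nil =>
      subst hre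
      have ha := h a (by simp)
      simp [popTrailing, ha]
    | cons r rs =>
      have hrne : rest ≠ [] := by rw [hre]; simp
      have hrt : popTrailing rest = rest := by
        apply ih
        intro w hw
        exact h w (by rw [getLast?_cons_ne _ _ hrne]; exact hw)
      rw [popTrailing, hre] at *
      rw [hrt]

-- ===== VERDICT (by name: the statement is the Claim_ definition above) =====
theorem compact_code_cell_source_py_spec : Claim_equal_compact_code_cell_source_py := by
  intro source _
  unfold Spec_compact_code_cell_source_py
  unfold compact_code_cell_source_py compact_code_cell_source_py_alt
  cases hl : popTrailing (popLeading (source.map normLine)) with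
  | nil => simp
  | cons first rest =>
    simp only [List.isEmpty_cons, Bool.false_eq_true, if_false]
    -- head of the trimmed list is non-blank
    have hfirst : isBlankLine first = false := by
      have hne : popTrailing (popLeading (source.map normLine)) ≠ [] := by rw [hl]; simp
      have hh := popTrailing_head _ hne
      rw [hl] at hh
      exact popLeading_head_nonblank _ first (by rw [← hh]; rfl)
    -- last of the trimmed list is non-blank
    have hlastl : ∀ w ∈ (first :: rest).getLast?, isBlankLine w = false := by
      intro w hw
      exact popTrailing_last_nonblank _ w (by rw [hl]; exact hw)
    have hrest_last : ∀ w ∈ rest.getLast?, isBlankLine w = false := by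
      intro w hw
      have hrne : rest ≠ [] := by
        intro h; rw [h] at hw; simp at hw
      exact hlastl w (by rw [getLast?_cons_ne _ _ hrne]; exact hw)
    -- A's loop equals B's loop
    have h0 : mainLoopA [] (first :: rest) [] = mainLoopA [first] rest [first] := by
      rw [mainLoopA, hfirst]
      simp
    have hmain := main_loop_eq rest [first] first false [first] hfirst
      (jscanA_cons_nonblank [] hfirst) (by simp) hrest_last (by simp)
    simp only [Bool.false_eq_true, if_false] at hmain
    -- B's result is well-formed
    obtain ⟨hhead, ⟨w, hwlast, hwnb⟩, hch, hbe⟩ :=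
      loopB_shape rest first false [first] first (by simp) hfirst (List.IsChain.singleton _)
        (by intro s hs hbs; simp at hs; subst hs; rw [hfirst] at hbs; cases hbs)
    -- the dedup pass and both trims are the identity on it
    have hd : dedupA (loopB rest first false [first]) false [] = loopB rest first false [first] := by
      rw [dedupA_id _ false [] hch hbe (by simp)]
      simp
    have hplr : popLeading (loopB rest first false [first]) = loopB rest first false [first] := by
      cases hr : loopB rest first false [first] with
      | nil => rfl
      | cons a l =>
        rw [hr] at hhead
        simp at hhead
        subst hhead
        simp [popLeading, hfirst]
    have hptr : popTrailing (loopB rest first false [first]) = loopB rest first false [first] := by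
      apply popTrailing_id
      intro w' hw'
      rw [hwlast] at hw'
      simp at hw'; subst hw'
      exact hwnb
    rw [h0, hmain, hd, hplr, hptr]
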